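-- pv_equiv track=rewrite | github.com/absoluteunit1/HackerRank | algorithms/implementation/organizeContainers.py | organizeContainers2
-- ===== SOURCE A (Python) =====
-- from copy import copy, deepcopy
--
-- def organizeContainers2(container):
--     def transpose(matrix):
--         transposed_matrix = deepcopy(matrix)
--         for i in range(len(matrix)):
--             for j in range(len(matrix)):
--                     transposed_matrix[j][i] = matrix[i][j]
--         return transposed_matrix
--
--     transposed_container = transpose(container)
--     odd = 0
--     t_odd = 0
--
--     for row in range(len(container)):
--         if (sum(container[row]))%2 == 1:
--             odd += 1
--         if (sum(transposed_container[row]))%2 == 1: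
--             t_odd += 1
--     return "Possible" if t_odd == odd else "Impossible"
-- ===== SOURCE B (Python) =====
-- def organizeContainers2(container):
--     # Single pass over the square, tracking only parities: no transposed copy is built.
--     n = len(container)
--     col_par = [0] * n
--     row_odd = 0
--     for i in range(n):
--         row_odd += sum(container[i]) % 2
--         for j in range(n):
--             col_par[j] = (col_par[j] + container[i][j]) % 2
--     return "Possible" if sum(col_par) == row_odd else "Impossible"
-- ===== Notes on version B (the rewrite author's own statement) =====
-- stated objective: simpler
-- what changed: Replaces the deepcopy-based transpose plus second counting loop with a single pass over the rows that accumulates column parities and the odd-row count directly, then compares the two counts.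
-- outside the precondition, e.g. on organizeContainers2([[1, 2], [3, 4, 5]]): A returns 'Possible', B returns 'Impossible'
import Mathlib
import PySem

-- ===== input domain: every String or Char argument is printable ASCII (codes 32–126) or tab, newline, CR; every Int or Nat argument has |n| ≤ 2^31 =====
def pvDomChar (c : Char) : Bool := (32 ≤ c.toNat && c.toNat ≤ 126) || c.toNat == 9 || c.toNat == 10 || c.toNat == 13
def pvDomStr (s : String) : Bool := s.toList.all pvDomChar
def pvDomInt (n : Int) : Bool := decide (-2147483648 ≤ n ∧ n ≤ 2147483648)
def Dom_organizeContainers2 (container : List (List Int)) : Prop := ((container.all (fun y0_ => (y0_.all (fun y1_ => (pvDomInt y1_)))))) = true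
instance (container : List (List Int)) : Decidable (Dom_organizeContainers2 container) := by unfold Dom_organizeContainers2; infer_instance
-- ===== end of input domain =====

-- B replaces A's deepcopy-based transpose + second counting loop with one pass over the
-- rows that accumulates column parities and the odd-row count directly (objective: simpler).

-- ===== PORT A =====
-- Python's built-in sum(xs): a left fold with +
def pvSum (r : List Int) : Int := r.foldl (· + ·) 0

def organizeContainers2 (container : List (List Int)) : String :=
  -- transpose(container): deepcopy, then transposed[j][i] = matrix[i][j] over range(n) × range(n)
  -- (pyGetD/pySetD defaults are only reached outside Pre_, where Python raises IndexError)
  let n : Int := (container.length : Int)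
  let transposed :=
    (PySem.List.pyRange 0 n 1).foldl (fun t i =>
      (PySem.List.pyRange 0 n 1).foldl (fun t j =>
        PySem.List.pySetD t j
          ((PySem.List.pyGetD t j []).set i.toNat
            (PySem.List.pyGetD (PySem.List.pyGetD container i []) j 0))) t)
      container
  let counts :=
    (PySem.List.pyRange 0 n 1).foldl (fun (p : Int × Int) row =>
      let odd := if PySem.Int.mod (pvSum (PySem.List.pyGetD container row [])) 2 = 1 then p.1 + 1 else p.1
      let t_odd := if PySem.Int.mod (pvSum (PySem.List.pyGetD transposed row [])) 2 = 1 then p.2 + 1 else p.2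
      (odd, t_odd)) (0, 0)
  if counts.2 = counts.1 then "Possible" else "Impossible"

-- ===== PORT B =====
def organizeContainers2_alt (container : List (List Int)) : String :=
  let n : Int := (container.length : Int)
  let st :=
    (PySem.List.pyRange 0 n 1).foldl (fun (st : List Int × Int) i =>
      let row_odd := st.2 + PySem.Int.mod (pvSum (PySem.List.pyGetD container i [])) 2
      let col_par :=
        (PySem.List.pyRange 0 n 1).foldl (fun cp j =>
          PySem.List.pySetD cp j
            (PySem.Int.mod (PySem.List.pyGetD cp j 0
              + PySem.List.pyGetD (PySem.List.pyGetD container i []) j 0) 2)) st.1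
      (col_par, row_odd))
    (List.replicate container.length 0, 0)
  if pvSum st.1 = st.2 then "Possible" else "Impossible"

-- ===== PRECONDITION & SPEC =====
-- Pre_ excludes ragged inputs: a row shorter than the matrix makes both A and B raise IndexError,
-- and a row longer than the matrix is an unspecified corner of the square-grid task where A's
-- transposed rows keep leftover deepcopy elements beyond the square while B ignores the extras.
def Pre_organizeContainers2 (container : List (List Int)) : Prop :=
  ∀ r ∈ container, r.length = container.length
instance (container : List (List Int)) : Decidable (Pre_organizeContainers2 container) := by
  unfold Pre_organizeContainers2; infer_instance
def pvWitness_organizeContainers2 : List (List Int) := [[1, 2], [3, 4]]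
def Spec_organizeContainers2 (container : List (List Int)) (out : String) : Prop := out = organizeContainers2_alt container
instance (container : List (List Int)) (out : String) : Decidable (Spec_organizeContainers2 container out) := by unfold Spec_organizeContainers2; infer_instance

-- ===== CLAIM (what is proved, stated in full; the proofs are below) =====
def Claim_equal_organizeContainers2 : Prop := ∀ (container : List (List Int)), Dom_organizeContainers2 container → Pre_organizeContainers2 container → Spec_organizeContainers2 container (organizeContainers2 container)

-- ===== LEMMAS AND PROOFS =====

-- parity of an integer, Python style (always 0 or 1)
def pvPar (x : Int) : Int := PySem.Int.mod x 2

theorem pvPar_eq_emod (x : Int) : pvPar x = x % 2 :=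
  PySem.Int.mod_eq_emod_of_pos (by norm_num)

theorem pvPar_cases (x : Int) : pvPar x = 0 ∨ pvPar x = 1 := by
  rw [pvPar_eq_emod]; omega

theorem pvPar_add_left (a b : Int) : pvPar (pvPar a + b) = pvPar (a + b) := by
  simp only [pvPar_eq_emod]; exact Int.emod_add_emod a 2 b

theorem pvSum_eq_sum (l : List Int) : pvSum l = l.sum := by
  simp [pvSum, List.sum_eq_foldl]

-- generic "fold of point updates over range m" lemma: each index < m is rewritten once
theorem foldSet_spec {α : Type} (f : Nat → α → α) (d : α) (m : Nat) (t : List α) :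
    ((List.range m).foldl (fun t k => t.set k (f k (t.getD k d))) t).length = t.length ∧
    ∀ j : Nat, ((List.range m).foldl (fun t k => t.set k (f k (t.getD k d))) t).getD j d
      = if j < m ∧ j < t.length then f j (t.getD j d) else t.getD j d := by
  induction m with
  | zero => simp
  | succ m ih =>
    rw [List.range_succ, List.foldl_append]
    simp only [List.foldl_cons, List.foldl_nil]
    obtain ⟨ihlen, ihget⟩ := ih
    set R := (List.range m).foldl (fun t k => t.set k (f k (t.getD k d))) t with hR
    refine ⟨by simp [ihlen], fun j => ?_⟩
    by_cases hj : j = m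
    · subst hj
      by_cases hlt : j < t.length
      · rw [List.getD_eq_getElem?_getD, List.getElem?_set, if_pos rfl, if_pos (by omega : j < R.length)]
        simp only [Option.getD_some]
        rw [ihget j, if_neg (by omega)]
        simp [hlt]
      · rw [List.getD_eq_getElem?_getD]
        have : (R.set j (f j (R.getD j d))).length ≤ j := by simp [ihlen]; omega
        rw [List.getElem?_eq_none (by simpa using this), Option.getD_none]
        rw [if_neg (by omega), List.getD_eq_default _ _ (by omega)]
    · rw [List.getD_eq_getElem?_getD, List.getElem?_set, if_neg (by omega)]
      rw [← List.getD_eq_getElem?_getD, ihget j]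
      by_cases h1 : j < m ∧ j < t.length
      · rw [if_pos h1, if_pos ⟨by omega, h1.2⟩]
      · rw [if_neg h1, if_neg (by omega)]

-- (range n).map (fun i => l.getD i d) = l
theorem map_getD_range {α : Type} (l : List α) (d : α) :
    (List.range l.length).map (fun i => l.getD i d) = l := by
  apply List.ext_getElem (by simp)
  intro i h1 h2
  simp [List.getD_eq_getElem?_getD, List.getElem?_eq_getElem h2]

theorem getD_map_range' {α : Type} (f : Nat → α) (n j : Nat) (d : α) :
    (((List.range n).map f).getD j d) = if j < n then f j else d := by
  rw [List.getD_eq_getElem?_getD, List.getElem?_map]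
  by_cases h : j < n <;> simp [h]

-- pair-shaped counting fold = pair of sums
theorem pairFold {β : Type} (l : List β) (a b : β → Int) :
    ∀ (p : Int × Int), l.foldl (fun p x => (p.1 + a x, p.2 + b x)) p
      = (p.1 + (l.map a).sum, p.2 + (l.map b).sum) := by
  induction l with
  | nil => simp
  | cons x l ih => intro p; simp [ih]; constructor <;> ring

-- column sums and the two odd counts both programs compute
def pvColSum (container : List (List Int)) (j : Nat) : Int :=
  (container.map (fun r => r.getD j 0)).sum
def pvSC (container : List (List Int)) : Int :=
  ((List.range container.length).map (fun j => pvPar (pvColSum container j))).sum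
def pvSR (container : List (List Int)) : Int :=
  (container.map (fun r => pvPar (pvSum r))).sum

-- A's in-place transpose loop, characterized row by row
theorem trans_spec (container : List (List Int)) (m : Nat) :
    (((List.range m).foldl (fun t i =>
        (List.range container.length).foldl
          (fun t j => t.set j ((t.getD j []).set i ((container.getD i []).getD j 0))) t)
      container).length = container.length) ∧
    ∀ j, j < container.length →
      ((List.range m).foldl (fun t i =>
          (List.range container.length).foldl
            (fun t j => t.set j ((t.getD j []).set i ((container.getD i []).getD j 0))) t)
        container).getD j []
      = (List.range m).foldl (fun r i => r.set i ((container.getD i []).getD j 0))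
          (container.getD j []) := by
  induction m with
  | zero => simp
  | succ m ih =>
    obtain ⟨ihlen, ihget⟩ := ih
    rw [List.range_succ]
    simp only [List.foldl_append, List.foldl_cons, List.foldl_nil]
    have hs := foldSet_spec (fun j v => v.set m ((container.getD m []).getD j 0)) []
      container.length
      ((List.range m).foldl (fun t i =>
        (List.range container.length).foldl
          (fun t j => t.set j ((t.getD j []).set i ((container.getD i []).getD j 0))) t)
        container)
    refine ⟨by rw [hs.1, ihlen], fun j hj => ?_⟩
    rw [hs.2 j, if_pos ⟨hj, by rw [ihlen]; exact hj⟩, ihget j hj]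

-- a transposed row, as a map over the column index
theorem rowfold_eq (container : List (List Int))
    (h : ∀ r ∈ container, r.length = container.length) (j : Nat) (hj : j < container.length) :
    (List.range container.length).foldl (fun r i => r.set i ((container.getD i []).getD j 0))
        (container.getD j [])
      = (List.range container.length).map (fun i => (container.getD i []).getD j 0) := by
  have hlen : (container.getD j []).length = container.length := by
    have hmem : container.getD j [] ∈ container := by
      rw [List.getD_eq_getElem _ _ hj]; exact List.getElem_mem _
    exact h _ hmem
  have hs := foldSet_spec (fun i (_ : Int) => (container.getD i []).getD j 0) 0
    container.length (container.getD j [])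
  apply List.ext_getElem (by rw [hs.1, hlen]; simp)
  intro i h1 h2
  have hi : i < container.length := by simpa using h2
  rw [← List.getD_eq_getElem _ 0 h1, hs.2 i, if_pos ⟨hi, by rw [hlen]; exact hi⟩]
  simp

-- A's counting loop as a pair of sums of parities
theorem countFold (n : Nat) (a b : Nat → Int) :
    (List.range n).foldl (fun (p : Int × Int) i =>
        (if PySem.Int.mod (a i) 2 = 1 then p.1 + 1 else p.1,
         if PySem.Int.mod (b i) 2 = 1 then p.2 + 1 else p.2)) (0, 0)
      = (((List.range n).map (fun i => pvPar (a i))).sum,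
         ((List.range n).map (fun i => pvPar (b i))).sum) := by
  have hstep : (fun (p : Int × Int) i =>
      (if PySem.Int.mod (a i) 2 = 1 then p.1 + 1 else p.1,
       if PySem.Int.mod (b i) 2 = 1 then p.2 + 1 else p.2))
      = fun (p : Int × Int) i => (p.1 + pvPar (a i), p.2 + pvPar (b i)) := by
    funext p i
    simp only [show PySem.Int.mod (a i) 2 = pvPar (a i) from rfl,
      show PySem.Int.mod (b i) 2 = pvPar (b i) from rfl]
    rcases pvPar_cases (a i) with h1 | h1 <;> rcases pvPar_cases (b i) with h2 | h2 <;>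
      simp [h1, h2]
  rw [hstep, pairFold]
  simp

theorem A_eq (container : List (List Int)) (h : ∀ r ∈ container, r.length = container.length) :
    organizeContainers2 container
      = if pvSC container = pvSR container then "Possible" else "Impossible" := by
  unfold organizeContainers2
  have hrange : PySem.List.pyRange 0 ((container.length : Int)) 1
      = (List.range container.length).map Nat.cast := by
    simp [PySem.List.pyRange_zero_natCast]
  simp only [hrange, List.foldl_map, PySem.List.pySetD_natCast, PySem.List.pyGetD_natCast,
    Int.toNat_natCast]
  rw [countFold]
  have hsr : (List.range container.length).map (fun i => pvPar (pvSum (container.getD i [])))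
      = container.map (fun r => pvPar (pvSum r)) := by
    conv_rhs => rw [← map_getD_range container []]
    rw [List.map_map]
    rfl
  have hsc : ((List.range container.length).map (fun i => pvPar (pvSum
        (((List.range container.length).foldl (fun t i =>
            (List.range container.length).foldl
              (fun t j => t.set j ((t.getD j []).set i ((container.getD i []).getD j 0))) t)
          container).getD i []))))
      = (List.range container.length).map (fun j => pvPar (pvColSum container j)) := by
    apply List.map_congr_left
    intro j hj
    rw [(trans_spec container container.length).2 j (List.mem_range.mp hj),
      rowfold_eq container h j (List.mem_range.mp hj)]
    have : ((List.range container.length).map (fun i => (container.getD i []).getD j 0))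
        = container.map (fun r => r.getD j 0) := by
      conv_rhs => rw [← map_getD_range container []]
      rw [List.map_map]
      rfl
    rw [pvSum_eq_sum, this]
    rfl
  rw [hsr, hsc]
  rfl

theorem B_inner (n : Nat) (row cp : List Int) (hcp : cp.length = n) :
    (List.range n).foldl (fun cp j =>
        cp.set j (PySem.Int.mod (cp.getD j 0 + row.getD j 0) 2)) cp
      = (List.range n).map (fun j => pvPar (cp.getD j 0 + row.getD j 0)) := by
  have hs := foldSet_spec (fun k v => PySem.Int.mod (v + row.getD k 0) 2) 0 n cp
  apply List.ext_getElem (by rw [hs.1, hcp, List.length_map, List.length_range])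
  intro i h1 h2
  rw [← List.getD_eq_getElem _ 0 h1]
  have hlt : i < n := by simpa using h2
  rw [hs.2 i, if_pos ⟨hlt, by omega⟩]
  rw [List.getElem_map, List.getElem_range]
  rfl

theorem B_outer (container : List (List Int)) :
    ∀ (m : Nat), m ≤ container.length → ∀ (z : Nat → Int) (acc : Int),
      (List.range m).foldl (fun (st : List Int × Int) i =>
          ((List.range container.length).foldl (fun cp j =>
              cp.set j (PySem.Int.mod (cp.getD j 0 + (container.getD i []).getD j 0) 2)) st.1,
           st.2 + PySem.Int.mod (pvSum (container.getD i [])) 2))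
        ((List.range container.length).map (fun j => pvPar (z j)), acc)
      = ((List.range container.length).map (fun j =>
            pvPar (z j + ((container.take m).map (fun r => r.getD j 0)).sum)),
         acc + ((container.take m).map (fun r => pvPar (pvSum r))).sum) := by
  intro m
  induction m with
  | zero => intro _ z acc; simp
  | succ m ih =>
    intro hm z acc
    rw [List.range_succ, List.foldl_append, ih (by omega) z acc]
    simp only [List.foldl_cons, List.foldl_nil]
    rw [B_inner container.length (container.getD m [])
      ((List.range container.length).map (fun j =>
        pvPar (z j + ((container.take m).map (fun r => r.getD j 0)).sum))) (by simp)]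
    have htake : container.take (m + 1) = container.take m ++ [container.getD m []] := by
      rw [List.getD_eq_getElem _ _ (by omega : m < container.length)]
      exact (List.take_concat_get' container m (by omega)).symm
    rw [htake]
    simp only [List.map_append, List.sum_append, List.map_cons, List.map_nil, List.sum_cons,
      List.sum_nil, Prod.mk.injEq]
    refine ⟨List.map_congr_left fun j hj => ?_, by show _ + pvPar _ = _; ring⟩
    rw [getD_map_range', if_pos (List.mem_range.mp hj), pvPar_add_left]
    ring_nf

theorem B_eq (container : List (List Int)) :
    organizeContainers2_alt container
      = if pvSC container = pvSR container then "Possible" else "Impossible" := by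
  unfold organizeContainers2_alt
  have hrange : PySem.List.pyRange 0 ((container.length : Int)) 1
      = (List.range container.length).map Nat.cast := by
    simp [PySem.List.pyRange_zero_natCast]
  simp only [hrange, List.foldl_map, PySem.List.pySetD_natCast, PySem.List.pyGetD_natCast]
  have hrep : List.replicate container.length (0 : Int)
      = (List.range container.length).map (fun j => pvPar ((fun _ => (0:Int)) j)) := by
    simp [pvPar, PySem.Int.mod]
  rw [hrep, B_outer container container.length le_rfl (fun _ => 0) 0, List.take_length]
  simp only [zero_add, pvSum_eq_sum]
  simp [pvSC, pvSR, pvColSum, pvSum_eq_sum]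

-- ===== VERDICT (by name: the statement is the Claim_ definition above) =====
theorem organizeContainers2_spec : Claim_equal_organizeContainers2 := by
  intro container _ hpre
  unfold Spec_organizeContainers2
  rw [A_eq container hpre, B_eq container]
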